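-- pv_equiv track=rewrite | github.com/nicolasspring/wikiextractor | cirrus-extract.py | strip_equations
-- ===== SOURCE A (Python) =====
-- def strip_equations(text: str) -> str:
--     stripped = []
--     in_equation = False
--     skip_next = False
--     equation_markers = ['\\displaystyle']
--     for i, char in enumerate(text):
--         if skip_next:
--             skip_next = False
--             continue
--         if char == '{' and not in_equation:
--             for marker in equation_markers:
--                 if text[i+1:i+len(marker)+1] == marker:
--                     braces_counter = 1
--                     in_equation = True
--                     break
--         elif char == '{' and in_equation:
--             braces_counter += 1
--         elif char == '}' and in_equation:
--             braces_counter -= 1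
--         if not in_equation:
--             stripped.append(char)
--         if in_equation and braces_counter == 0:
--             in_equation = False
--             skip_next = True
--     return ''.join(stripped)
-- ===== SOURCE B (Python) =====
-- _MARKER = '\\displaystyle'
--
-- def _skip_equation(rest):
--     # rest starts just after the opening '{'; consume until braces balance,
--     # then one extra char (the original also skips the char after the '}').
--     depth = 1
--     while rest and depth > 0:
--         if rest[0] == '{':
--             depth += 1
--         elif rest[0] == '}':
--             depth -= 1
--         rest = rest[1:]
--     if depth == 0:
--         rest = rest[1:]
--     return rest
--
-- def strip_equations(text: str) -> str:
--     out = []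
--     rest = text
--     while rest:
--         if rest[0] == '{' and rest[1:1 + len(_MARKER)] == _MARKER:
--             rest = _skip_equation(rest[1:])
--         else:
--             out.append(rest[0])
--             rest = rest[1:]
--     return ''.join(out)
-- ===== Notes on version B (the rewrite author's own statement) =====
-- stated objective: simpler
-- what changed: Replaced A's persistent in_equation/skip_next/braces_counter flag machine over enumerate(text) by a plain outer scan with a nested brace-balancing skip loop (and the one-char post-equation skip applied only when the braces balanced).
import Mathlib
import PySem

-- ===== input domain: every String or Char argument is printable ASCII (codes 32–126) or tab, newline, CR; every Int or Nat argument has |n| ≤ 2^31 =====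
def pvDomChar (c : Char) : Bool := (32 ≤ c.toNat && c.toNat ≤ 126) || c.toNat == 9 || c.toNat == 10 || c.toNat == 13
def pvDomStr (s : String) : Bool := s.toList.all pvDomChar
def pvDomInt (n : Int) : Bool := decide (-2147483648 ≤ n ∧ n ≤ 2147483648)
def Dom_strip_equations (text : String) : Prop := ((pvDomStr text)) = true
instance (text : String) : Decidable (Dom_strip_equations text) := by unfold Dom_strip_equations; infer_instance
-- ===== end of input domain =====

-- B replaces A's persistent in_equation/skip_next/braces_counter flag machine by a plain
-- outer scan with a nested brace-balancing skip loop (objective: simpler decomposition).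

-- ===== PORT A =====
-- the single entry of A's `equation_markers` list
def pvMarker : String := "\\displaystyle"

-- A's loop body: state = (stripped, in_equation, skip_next, braces_counter); A's inner
-- `for marker in equation_markers` has exactly one marker, so its hit test is that one
-- slice comparison text[i+1:i+len(marker)+1] == marker.
def stepA (tl : List Char) (st : List Char × Bool × Bool × Int) (ic : Int × Char) :
    List Char × Bool × Bool × Int :=
  let (stripped, inEq, skip, cnt) := st
  let (i, c) := ic
  if skip then (stripped, inEq, false, cnt)
  else
    let (inEq2, cnt2) :=
      if c == '{' && !inEq then
        (if PySem.List.slice tl (some (i + 1)) (some (i + PySem.Str.len pvMarker + 1))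
              == pvMarker.toList
         then (true, (1 : Int)) else (inEq, cnt))
      else if c == '{' && inEq then (inEq, cnt + 1)
      else if c == '}' && inEq then (inEq, cnt - 1)
      else (inEq, cnt)
    let stripped2 := if !inEq2 then stripped ++ [c] else stripped
    if inEq2 && cnt2 == 0 then (stripped2, false, true, cnt2)
    else (stripped2, inEq2, false, cnt2)

def strip_equations (text : String) : String :=
  let tl := text.toList
  -- braces_counter is unassigned before the first equation; it is never read there, 0 is a dummy
  let st := (PySem.List.enumerate tl 0).foldl (stepA tl) ([], false, false, 0)
  String.ofList st.1   -- ''.join(stripped)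

-- ===== PORT B =====
-- _skip_equation's while loop: consume chars maintaining the depth while rest ≠ [] and depth > 0
def skipEqLoop : Int → List Char → Int × List Char
  | d, [] => (d, [])
  | d, c :: rest =>
    if 0 < d then skipEqLoop (if c == '{' then d + 1 else if c == '}' then d - 1 else d) rest
    else (d, c :: rest)

theorem skipEqLoop_len : ∀ (d : Int) (l : List Char), (skipEqLoop d l).2.length ≤ l.length := by
  intro d l
  induction l generalizing d with
  | nil => simp [skipEqLoop]
  | cons c rest ih =>
    simp only [skipEqLoop]
    split
    · exact le_trans (ih _) (by simp)
    · simp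

def skipEq (rest : List Char) : List Char :=
  let (d, r) := skipEqLoop 1 rest
  if d == 0 then r.drop 1 else r

theorem skipEq_len (rest : List Char) : (skipEq rest).length ≤ rest.length := by
  unfold skipEq
  have h := skipEqLoop_len 1 rest
  rcases hdr : skipEqLoop 1 rest with ⟨d, r⟩
  rw [hdr] at h
  dsimp only
  split <;> simp at h ⊢ <;> omega

-- Source B's outer while loop; rest[1:1+len(marker)] is the 13 chars after the head
def goB : List Char → List Char
  | [] => []
  | c :: rest =>
    if c == '{' && rest.take 13 == pvMarker.toList then goB (skipEq rest)
    else c :: goB rest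
termination_by l => l.length
decreasing_by
  · exact Nat.lt_succ_of_le (skipEq_len rest)
  · simp

def strip_equations_alt (text : String) : String :=
  String.ofList (goB text.toList)   -- ''.join(out)

-- ===== PRECONDITION & SPEC =====
def Spec_strip_equations (text : String) (out : String) : Prop := out = strip_equations_alt text
instance (text : String) (out : String) : Decidable (Spec_strip_equations text out) := by unfold Spec_strip_equations; infer_instance

-- ===== CLAIM (what is proved, stated in full; the proofs are below) =====
def Claim_equal_strip_equations : Prop := ∀ (text : String), Dom_strip_equations text → Spec_strip_equations text (strip_equations text)

-- ===== LEMMAS AND PROOFS =====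

-- B's post-loop fixup, parametrised by the entry depth (proof-side helper)
def skipEqD (d : Int) (l : List Char) : List Char :=
  let (d', r) := skipEqLoop d l
  if d' == 0 then r.drop 1 else r

theorem skipEq_eq_skipEqD (l : List Char) : skipEq l = skipEqD 1 l := rfl

theorem stepA_skip (tl acc : List Char) (inEq : Bool) (cnt : Int) (i : Int) (c : Char) :
    stepA tl (acc, inEq, true, cnt) (i, c) = (acc, inEq, false, cnt) := by
  simp [stepA]

theorem stepA_normal (tl acc : List Char) (cnt : Int) (i : Int) (c : Char) :
    stepA tl (acc, false, false, cnt) (i, c) =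
      (if c = '{' ∧ PySem.List.slice tl (some (i + 1))
            (some (i + PySem.Str.len pvMarker + 1)) = pvMarker.toList
       then (acc, true, false, 1) else (acc ++ [c], false, false, cnt)) := by
  by_cases h1 : c = '{' <;>
    by_cases hh : PySem.List.slice tl (some (i + 1))
        (some (i + PySem.Str.len pvMarker + 1)) = pvMarker.toList <;>
    by_cases h2 : c = '}' <;> simp_all [stepA]

theorem stepA_eqmode (tl acc : List Char) (d : Int) (_hd : 0 < d) (i : Int) (c : Char) :
    stepA tl (acc, true, false, d) (i, c) =
      (let d' := if c = '{' then d + 1 else if c = '}' then d - 1 else d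
       if d' = 0 then (acc, false, true, d') else (acc, true, false, d')) := by
  by_cases h1 : c = '{' <;> by_cases h2 : c = '}' <;>
    simp_all [stepA]

theorem skipEqD_cons (d : Int) (hd : 0 < d) (c : Char) (rest : List Char) :
    skipEqD d (c :: rest) =
      skipEqD (if c = '{' then d + 1 else if c = '}' then d - 1 else d) rest := by
  by_cases h1 : c = '{' <;> by_cases h2 : c = '}' <;>
    simp [skipEqD, skipEqLoop, hd, h1, h2]

-- the main invariant: on the suffix l = tl.drop k, A's fold in normal mode produces goB l,
-- and in equation mode (depth d) it produces goB of what _skip_equation leaves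
theorem mainInv : ∀ (n : Nat) (tl l : List Char) (k : Nat), tl.drop k = l → l.length ≤ n →
    (∀ (acc : List Char) (cnt : Int),
       (((PySem.List.enumerate l (k : Int)).foldl (stepA tl) (acc, false, false, cnt))).1
         = acc ++ goB l)
    ∧ (∀ (acc : List Char) (d : Int), 0 < d →
       (((PySem.List.enumerate l (k : Int)).foldl (stepA tl) (acc, true, false, d))).1
         = acc ++ goB (skipEqD d l)) := by
  intro n
  induction n with
  | zero =>
    intro tl l k hdrop hlen
    have hnil : l = [] := List.eq_nil_of_length_eq_zero (Nat.le_zero.mp hlen)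
    subst hnil
    constructor
    · intro acc cnt; simp [PySem.List.enumerate, goB]
    · intro acc d hd
      have hdne : ¬(d = 0) := by omega
      simp [PySem.List.enumerate, skipEqD, skipEqLoop, hdne, goB]
  | succ n ih =>
    intro tl l k hdrop hlen
    cases l with
    | nil =>
      constructor
      · intro acc cnt; simp [PySem.List.enumerate, goB]
      · intro acc d hd
        have hdne : ¬(d = 0) := by omega
        simp [PySem.List.enumerate, skipEqD, skipEqLoop, hdne, goB]
    | cons c rest =>
      have hrl : rest.length ≤ n := by
        have := hlen; simp at this; omega
      have hdrop1 : tl.drop (k + 1) = rest := by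
        have h1 : List.drop 1 (List.drop k tl) = rest := by rw [hdrop]; simp
        rwa [List.drop_drop] at h1
      have hcast1 : ((k : Int) + 1) = (((k + 1 : Nat)) : Int) := by push_cast; ring
      -- the slice A tests is exactly the 13 characters after the current one
      have hsl : PySem.List.slice tl (some ((k : Int) + 1))
            (some ((k : Int) + PySem.Str.len pvMarker + 1)) = rest.take 13 := by
        have hlen13 : PySem.Str.len pvMarker = 13 := by decide
        rw [hlen13]
        have hb : ((k : Int) + 13 + 1) = (((k + 1 : Nat) : Int) + ((13 : Nat) : Int)) := by
          push_cast; ring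
        rw [hcast1, hb, PySem.List.slice_natCast_add, hdrop1]
      constructor
      · -- normal mode
        intro acc cnt
        simp only [PySem.List.enumerate, List.foldl_cons]
        rw [stepA_normal, hsl, hcast1]
        by_cases hc : c = '{' ∧ rest.take 13 = pvMarker.toList
        · rw [if_pos hc]
          have hE := (ih tl rest (k + 1) hdrop1 hrl).2 acc 1 (by omega)
          rw [hE, ← skipEq_eq_skipEqD]
          simp [goB, hc.1, hc.2]
        · rw [if_neg hc]
          have hN := (ih tl rest (k + 1) hdrop1 hrl).1 (acc ++ [c]) cnt
          rw [hN]
          have hg : goB (c :: rest) = c :: goB rest := by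
            rcases not_and_or.mp hc with h | h <;> simp [goB, h]
          rw [hg]; simp
      · -- equation mode at depth d
        intro acc d hd
        simp only [PySem.List.enumerate, List.foldl_cons]
        rw [stepA_eqmode tl acc d hd (k : Int) c]
        set d' := if c = '{' then d + 1 else if c = '}' then d - 1 else d with hd'
        rw [skipEqD_cons d hd c rest, ← hd']
        by_cases hz : d' = 0
        · simp only [hz, reduceIte]
          cases rest with
          | nil =>
            simp [PySem.List.enumerate, skipEqD, skipEqLoop, goB]
          | cons c2 rest2 =>
            have hdrop2 : tl.drop (k + 2) = rest2 := by
              have h1 : List.drop 1 (List.drop (k + 1) tl) = rest2 := by rw [hdrop1]; simp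
              rwa [List.drop_drop] at h1
            have hcast2 : (((k + 1 : Nat) : Int) + 1) = (((k + 2 : Nat)) : Int) := by
              push_cast; ring
            simp only [hcast1, PySem.List.enumerate, List.foldl_cons,
              stepA_skip, hcast2]
            have hr2 : rest2.length ≤ n := by simp at hrl; omega
            have hN := (ih tl rest2 (k + 2) hdrop2 hr2).1 acc 0
            rw [hN]
            have hsk : skipEqD 0 (c2 :: rest2) = rest2 := by
              simp [skipEqD, skipEqLoop]
            rw [hsk]
        · simp only [if_neg hz]
          rw [hcast1]
          have hdpos : 0 < d' := by
            rw [hd'] at hz ⊢; split_ifs at hz ⊢ <;> omega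
          have hE := (ih tl rest (k + 1) hdrop1 hrl).2 acc d' hdpos
          rw [hE]

-- ===== VERDICT (by name: the statement is the Claim_ definition above) =====
theorem strip_equations_spec : Claim_equal_strip_equations := by
  intro text _
  unfold Spec_strip_equations strip_equations strip_equations_alt
  have h := (mainInv text.toList.length text.toList text.toList 0 (by simp) (le_refl _)).1 [] 0
  simpa using congrArg String.ofList h
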